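-- pv_equiv track=rewrite | github.com/giusopo/A-multi-agent-framework-for-automating-software-development-processes | agents/tradeoff_agent/agent/utils.py | extract_drivers_info
-- ===== SOURCE A (Python) =====
-- def extract_drivers_info(QA_drivers, QA_candidates):
--     """
--     Restituisce un dizionario con le informazioni dei driver QA
--
--     Argomenti:
--     - QA_drivers: lista di driver QA (step 3)
--     - QA_candidates: lista di candidati QA (step 2)
--
--     Ritorna:
--     - Dizionario con informazioni sui driver
--     """
--     drivers_info = {}
--
--     for driver in QA_drivers:
--         driver_name = driver.get("quality_attribute")
--         if not driver_name:
--             continue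
--
--         # Trova il candidato corrispondente
--         candidate = next(
--             (c for c in QA_candidates if c.get("name") == driver_name),
--             None
--         )
--
--         if candidate:
--             drivers_info[driver_name] = candidate
--
--     return drivers_info
-- ===== SOURCE B (Python) =====
-- def extract_drivers_info(QA_drivers, QA_candidates):
--     # Candidate-major strategy: collect the wanted (truthy) driver names once,
--     # sweep the candidate list a single time recording the first candidate per
--     # wanted name, then emit the entries in driver order.
--     wanted = dict.fromkeys(
--         d.get("quality_attribute")
--         for d in QA_drivers
--         if d.get("quality_attribute")
--     )
--     found = {}
--     for c in QA_candidates: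
--         name = c.get("name")
--         if name in wanted and name not in found:
--             found[name] = c
--     return {name: found[name] for name in wanted if name in found}
-- ===== Notes on version B (the rewrite author's own statement) =====
-- stated objective: alternative
-- what changed: Traversal is reversed: instead of scanning the whole candidate list once per driver, B precomputes the set of wanted driver names, makes a single candidate-major sweep recording the first candidate per wanted name, and then projects the result back into driver order.
import Mathlib
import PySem

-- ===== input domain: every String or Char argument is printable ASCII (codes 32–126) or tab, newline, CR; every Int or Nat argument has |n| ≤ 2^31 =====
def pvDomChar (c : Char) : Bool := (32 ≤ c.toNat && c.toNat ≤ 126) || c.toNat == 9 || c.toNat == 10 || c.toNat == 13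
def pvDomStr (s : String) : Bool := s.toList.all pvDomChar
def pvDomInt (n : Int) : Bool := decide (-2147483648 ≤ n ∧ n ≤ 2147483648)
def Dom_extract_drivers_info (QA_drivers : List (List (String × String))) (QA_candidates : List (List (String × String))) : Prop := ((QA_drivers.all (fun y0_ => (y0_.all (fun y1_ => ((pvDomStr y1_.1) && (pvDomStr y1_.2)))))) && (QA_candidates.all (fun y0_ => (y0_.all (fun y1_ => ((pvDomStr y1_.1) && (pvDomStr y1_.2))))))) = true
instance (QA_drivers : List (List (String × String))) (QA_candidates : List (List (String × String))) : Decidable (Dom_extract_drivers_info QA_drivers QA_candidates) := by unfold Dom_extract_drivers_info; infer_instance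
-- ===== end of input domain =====

-- B reverses the traversal: a precomputed wanted-name list, one candidate-major
-- sweep, then a projection pass back into driver order (objective: alternative).

-- ===== PORT A =====
-- assoc-list helpers: Python d.get(k) (first match) and
-- dict assignment d[k] = v (overwrite keeps position, new keys append)
def alGet {ν : Type} (d : List (String × ν)) (k : String) : Option ν :=
  match d with
  | [] => none
  | (k', v) :: rest => if k' = k then some v else alGet rest k

def alInsert {ν : Type} (d : List (String × ν)) (k : String) (v : ν) : List (String × ν) :=
  match d with
  | [] => [(k, v)]
  | (k', v') :: rest => if k' = k then (k, v) :: rest else (k', v') :: alInsert rest k v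

def extract_drivers_info (QA_drivers : List (List (String × String))) (QA_candidates : List (List (String × String))) : List (String × List (String × String)) :=
  QA_drivers.foldl (fun drivers_info driver =>
    match alGet driver "quality_attribute" with
    | none => drivers_info                 -- `if not driver_name: continue` (missing key)
    | some driver_name =>
      if driver_name = "" then drivers_info  -- `if not driver_name: continue` (falsy string)
      else
        match QA_candidates.find? (fun c => alGet c "name" == some driver_name) with
        | none => drivers_info             -- next(..., None) found nothing
        | some candidate =>
          if candidate = [] then drivers_info   -- `if candidate:` (empty dict is falsy)
          else alInsert drivers_info driver_name candidate) []

-- ===== PORT B =====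
def extract_drivers_info_alt (QA_drivers : List (List (String × String))) (QA_candidates : List (List (String × String))) : List (String × List (String × String)) :=
  -- wanted = dict.fromkeys(truthy quality_attribute values): ordered, deduplicated keys
  let wanted := QA_drivers.foldl (fun w d =>
    match alGet d "quality_attribute" with
    | none => w
    | some n => if n = "" then w else if n ∈ w then w else w ++ [n]) []
  -- single candidate-major sweep: first candidate per wanted name
  let found := QA_candidates.foldl (fun found c =>
    match alGet c "name" with
    | none => found                            -- `None in wanted` is False
    | some name =>
      if name ∈ wanted ∧ alGet found name = none then found ++ [(name, c)]
      else found) []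
  -- {name: found[name] for name in wanted if name in found}
  wanted.filterMap (fun n => (alGet found n).map (fun c => (n, c)))

-- ===== PRECONDITION & SPEC =====
def Spec_extract_drivers_info (QA_drivers : List (List (String × String))) (QA_candidates : List (List (String × String))) (out : List (String × List (String × String))) : Prop := out = extract_drivers_info_alt QA_drivers QA_candidates
instance (QA_drivers : List (List (String × String))) (QA_candidates : List (List (String × String))) (out : List (String × List (String × String))) : Decidable (Spec_extract_drivers_info QA_drivers QA_candidates out) := by unfold Spec_extract_drivers_info; infer_instance

-- ===== CLAIM (what is proved, stated in full; the proofs are below) =====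
def Claim_equal_extract_drivers_info : Prop := ∀ (QA_drivers : List (List (String × String))) (QA_candidates : List (List (String × String))), Dom_extract_drivers_info QA_drivers QA_candidates → Spec_extract_drivers_info QA_drivers QA_candidates (extract_drivers_info QA_drivers QA_candidates)

-- ===== LEMMAS AND PROOFS =====

theorem alGet_append {ν : Type} (a b : List (String × ν)) (k : String) :
    alGet (a ++ b) k = (alGet a k).or (alGet b k) := by
  induction a with
  | nil => simp [alGet]
  | cons p rest ih =>
    obtain ⟨k', v⟩ := p
    by_cases h : k' = k <;> simp [alGet, h, ih]

theorem alInsert_self {ν : Type} (d : List (String × ν)) (k : String) (v : ν)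
    (h : alGet d k = some v) : alInsert d k v = d := by
  induction d with
  | nil => simp [alGet] at h
  | cons p rest ih =>
    obtain ⟨k', v'⟩ := p
    by_cases hk : k' = k
    · subst hk
      simp [alGet] at h
      simp [alInsert, h]
    · simp only [alGet, if_neg hk] at h
      simp [alInsert, hk, ih h]

theorem alInsert_fresh {ν : Type} (d : List (String × ν)) (k : String) (v : ν)
    (h : alGet d k = none) : alInsert d k v = d ++ [(k, v)] := by
  induction d with
  | nil => simp [alInsert]
  | cons p rest ih =>
    obtain ⟨k', v'⟩ := p
    by_cases hk : k' = k
    · simp [alGet, hk] at h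
    · simp only [alGet, if_neg hk] at h
      simp [alInsert, hk, ih h]

-- a candidate found by A's scan is a nonempty dict (it has a "name" entry)
theorem find?_ne_nil (cands : List (List (String × String))) (n : String) (c : List (String × String))
    (h : cands.find? (fun c => alGet c "name" == some n) = some c) : ¬ (c = []) := by
  have := List.find?_some h
  intro hnil
  subst hnil
  simp [alGet] at this

-- the candidate-major sweep records, for each wanted name, exactly A's
-- first-match scan of the candidate list
theorem found_get (w : List String) (cs : List (List (String × String))) :
    ∀ (acc : List (String × List (String × String))) (n : String),
    alGet (cs.foldl (fun found c =>
      match alGet c "name" with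
      | none => found
      | some name =>
        if name ∈ w ∧ alGet found name = none then found ++ [(name, c)]
        else found) acc) n
    = (alGet acc n).or (if n ∈ w then cs.find? (fun c => alGet c "name" == some n) else none) := by
  induction cs with
  | nil => intro acc n; cases h : alGet acc n <;> simp [h]
  | cons c rest ih =>
    intro acc n
    simp only [List.foldl_cons]
    cases hc : alGet c "name" with
    | none =>
      rw [List.find?_cons_of_neg (by simp [hc]), ih]
    | some m =>
      dsimp only
      by_cases hcase : m ∈ w ∧ alGet acc m = none
      · rw [if_pos hcase, ih, alGet_append]
        by_cases hmn : m = n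
        · subst hmn
          rw [List.find?_cons_of_pos (by simp [hc])]
          simp [hcase.2, alGet, hcase.1]
        · rw [List.find?_cons_of_neg (by simp [hc, hmn])]
          simp [alGet, hmn]
      · rw [if_neg hcase, ih]
        by_cases hmn : m = n
        · subst hmn
          rw [List.find?_cons_of_pos (by simp [hc])]
          rcases not_and_or.mp hcase with hw | hsome
          · simp [hw]
          · obtain ⟨v, hv⟩ := Option.ne_none_iff_exists'.mp hsome
            simp [hv]
        · rw [List.find?_cons_of_neg (by simp [hc, hmn])]

-- projection of the wanted list: looking a name up yields A's first-match scan
def gProj (cands : List (List (String × String))) (n : String) : Option (String × List (String × String)) :=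
  (cands.find? (fun c => alGet c "name" == some n)).map (fun c => (n, c))

theorem alGet_filterMap (cands : List (List (String × String))) (acc : List String) (m : String) :
    alGet (acc.filterMap (gProj cands)) m
      = if m ∈ acc then cands.find? (fun c => alGet c "name" == some m) else none := by
  induction acc with
  | nil => simp [alGet]
  | cons a rest ih =>
    rw [List.filterMap_cons]
    cases hf : cands.find? (fun c => alGet c "name" == some a) with
    | none =>
      have hg : gProj cands a = none := by simp [gProj, hf]
      rw [hg, ih]
      by_cases ham : a = m
      · subst ham
        by_cases hm : a ∈ rest <;> simp [hm, hf]
      · simp [List.mem_cons, Ne.symm ham]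
    | some c =>
      have hg : gProj cands a = some (a, c) := by simp [gProj, hf]
      rw [hg]
      by_cases ham : a = m
      · subst ham
        simp [alGet, hf]
      · rw [show alGet ((a, c) :: rest.filterMap (gProj cands)) m
              = alGet (rest.filterMap (gProj cands)) m from by simp [alGet, ham], ih]
        simp [List.mem_cons, Ne.symm ham]

-- A's driver loop computes the projection of the wanted-name list
theorem A_loop (cands : List (List (String × String))) (drivers : List (List (String × String))) :
    ∀ (acc : List String),
    drivers.foldl (fun drivers_info driver =>
      match alGet driver "quality_attribute" with
      | none => drivers_info
      | some driver_name =>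
        if driver_name = "" then drivers_info
        else
          match cands.find? (fun c => alGet c "name" == some driver_name) with
          | none => drivers_info
          | some candidate =>
            if candidate = [] then drivers_info
            else alInsert drivers_info driver_name candidate) (acc.filterMap (gProj cands))
    = (drivers.foldl (fun w d =>
        match alGet d "quality_attribute" with
        | none => w
        | some n => if n = "" then w else if n ∈ w then w else w ++ [n]) acc).filterMap (gProj cands) := by
  induction drivers with
  | nil => intro acc; rfl
  | cons d rest ih =>
    intro acc
    simp only [List.foldl_cons]
    cases hd : alGet d "quality_attribute" with
    | none => exact ih acc
    | some n =>
      by_cases hn : n = ""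
      · simp only [hn, if_true]; exact ih acc
      · simp only [hn, if_false]
        cases hf : cands.find? (fun c => alGet c "name" == some n) with
        | none =>
          by_cases hm : n ∈ acc
          · simp only [hm, if_true]; exact ih acc
          · simp only [hm, if_false]
            have : (acc ++ [n]).filterMap (gProj cands) = acc.filterMap (gProj cands) := by
              simp [List.filterMap_append, gProj, hf]
            rw [← this]; exact ih (acc ++ [n])
        | some c =>
          have hc : ¬ (c = []) := find?_ne_nil cands n c hf
          simp only [hc, if_false]
          by_cases hm : n ∈ acc
          · have hget : alGet (acc.filterMap (gProj cands)) n = some c := by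
              rw [alGet_filterMap]; simp [hm, hf]
            rw [alInsert_self _ _ _ hget]
            simp only [hm, if_true]
            exact ih acc
          · have hget : alGet (acc.filterMap (gProj cands)) n = none := by
              rw [alGet_filterMap]; simp [hm]
            rw [alInsert_fresh _ _ _ hget]
            have : acc.filterMap (gProj cands) ++ [(n, c)] = (acc ++ [n]).filterMap (gProj cands) := by
              simp [List.filterMap_append, gProj, hf]
            rw [this]
            simp only [hm, if_false]
            exact ih (acc ++ [n])

-- ===== VERDICT (by name: the statement is the Claim_ definition above) =====
theorem extract_drivers_info_spec : Claim_equal_extract_drivers_info := by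
  intro drivers cands _
  unfold Spec_extract_drivers_info extract_drivers_info extract_drivers_info_alt
  have hA := A_loop cands drivers []
  simp only [List.filterMap_nil] at hA
  rw [hA]
  apply List.filterMap_congr
  intro n hn
  rw [found_get _ cands [] n]
  simp [alGet, hn, gProj]
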